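-- pv_equiv track=rewrite | github.com/Nabil-hamoudi/l1-python | exercises/TD03_fonctions/TD3.py | tempsEnDate
-- ===== SOURCE A (Python) =====
-- def tempsEnDate(temps):
--
--     Dtemps = [0, 0, 0, temps[1], temps[2], temps[3]]
--
--     Dtemps[0] = temps[0] // 365
--     Feb = 28
--     Month = 1
--     Dtemps[1] = temps[0] % 365
--
--     while Dtemps[1] > 0 :
--         Dtemps[2] = Dtemps[1]
--
--         if Month == 4 or Month == 6 or Month == 9 or Month == 11 :
--             Dtemps[1] -= 30
--
--         elif Month == 2 :
--             Dtemps[1] -= Feb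
--
--         else :
--             Dtemps[1] -= 31
--         Month += 1
--
--     Dtemps[1] = Month - 1
--     Dtemps[0] += 1970
--
--     return Dtemps
-- ===== SOURCE B (Python) =====
-- def tempsEnDate(temps):
--     cum = [0, 31, 59, 90, 120, 151, 181, 212, 243, 273, 304, 334, 365]
--     r = temps[0] % 365
--     month = next(i for i, c in enumerate(cum) if r <= c)
--     day = r - cum[month - 1] if month > 0 else 0
--     return [temps[0] // 365 + 1970, month, day, temps[1], temps[2], temps[3]]
-- ===== Notes on version B (the rewrite author's own statement) =====
-- stated objective: idiomatic
-- what changed: B replaces A's subtract-month-lengths while-loop by a precomputed cumulative month-boundary table searched for the first entry >= temps[0] % 365, computing the day by one subtraction against that table.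
-- outside the precondition, e.g. on tempsEnDate([0]): A raises IndexError, B raises IndexError
import Mathlib
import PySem

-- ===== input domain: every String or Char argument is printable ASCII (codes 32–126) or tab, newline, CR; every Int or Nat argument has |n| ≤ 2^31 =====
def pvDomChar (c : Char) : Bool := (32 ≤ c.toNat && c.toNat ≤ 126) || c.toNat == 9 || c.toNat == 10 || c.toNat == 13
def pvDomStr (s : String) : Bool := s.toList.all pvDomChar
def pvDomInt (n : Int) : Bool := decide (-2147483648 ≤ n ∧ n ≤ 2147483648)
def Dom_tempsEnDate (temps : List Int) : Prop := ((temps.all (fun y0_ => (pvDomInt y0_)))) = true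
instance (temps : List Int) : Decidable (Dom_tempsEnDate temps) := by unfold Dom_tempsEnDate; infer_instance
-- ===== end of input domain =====

-- B finds the month by scanning a precomputed cumulative month-boundary table instead of A's subtract-a-month-at-a-time loop; same results, different representation.

-- ===== PORT A =====
-- A's while-loop: state (r = Dtemps[1], day = Dtemps[2], Month); fuel only makes the
-- recursion structural — 365 steps always suffice since each iteration subtracts ≥ 28.
def tempsEnDateLoop : Nat → Int → Int → Int → Int × Int
  | 0, _, day, month => (day, month)
  | fuel+1, r, day, month =>
    if r > 0 then
      let day' := r
      let r' := if month = 4 ∨ month = 6 ∨ month = 9 ∨ month = 11 then r - 30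
                else if month = 2 then r - 28
                else r - 31
      tempsEnDateLoop fuel r' day' (month + 1)
    else (day, month)

def tempsEnDate (temps : List Int) : List Int :=
  let t0 := (PySem.List.pyGet? temps 0).getD 0
  let t1 := (PySem.List.pyGet? temps 1).getD 0
  let t2 := (PySem.List.pyGet? temps 2).getD 0
  let t3 := (PySem.List.pyGet? temps 3).getD 0
  let y := PySem.Int.floordiv t0 365
  let r := PySem.Int.mod t0 365
  let dm := tempsEnDateLoop 365 r 0 1
  [y + 1970, dm.2 - 1, dm.1, t1, t2, t3]

-- ===== PORT B =====
def tempsEnDate_alt (temps : List Int) : List Int :=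
  let cum : List Int := [0, 31, 59, 90, 120, 151, 181, 212, 243, 273, 304, 334, 365]
  let t0 := (PySem.List.pyGet? temps 0).getD 0
  let r := PySem.Int.mod t0 365
  let month : Int := (cum.findIdx (fun c => r ≤ c) : Int)
  let day : Int := if month > 0 then r - cum.getD (month - 1).toNat 0 else 0
  [PySem.Int.floordiv t0 365 + 1970, month, day,
   (PySem.List.pyGet? temps 1).getD 0,
   (PySem.List.pyGet? temps 2).getD 0,
   (PySem.List.pyGet? temps 3).getD 0]

-- ===== PRECONDITION & SPEC =====
-- A raises IndexError when temps has fewer than 4 elements; Pre_ excludes exactly those.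
def Pre_tempsEnDate (temps : List Int) : Prop := 4 ≤ temps.length
instance (temps : List Int) : Decidable (Pre_tempsEnDate temps) := by unfold Pre_tempsEnDate; infer_instance
def pvWitness_tempsEnDate : List Int := [400, 1, 2, 3]

def Spec_tempsEnDate (temps : List Int) (out : List Int) : Prop := out = tempsEnDate_alt temps
instance (temps : List Int) (out : List Int) : Decidable (Spec_tempsEnDate temps out) := by unfold Spec_tempsEnDate; infer_instance

-- ===== CLAIM (what is proved, stated in full; the proofs are below) =====
def Claim_equal_tempsEnDate : Prop := ∀ (temps : List Int), Dom_tempsEnDate temps → Pre_tempsEnDate temps → Spec_tempsEnDate temps (tempsEnDate temps)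

-- ===== LEMMAS AND PROOFS =====

-- B's (day, month+1) pair as one function of the residue (proof helper only).
def pvPairB (r : Int) : Int × Int :=
  let cum : List Int := [0, 31, 59, 90, 120, 151, 181, 212, 243, 273, 304, 334, 365]
  let month : Int := (cum.findIdx (fun c => r ≤ c) : Int)
  ((if month > 0 then r - cum.getD (month - 1).toNat 0 else 0), month + 1)

-- A's loop, started at any residue 0 ≤ r < 365, returns B's day and B's month plus one
-- (A subtracts the one afterwards).
set_option maxRecDepth 10000 in
theorem loop_key : ∀ n : Fin 365,
    tempsEnDateLoop 365 (n.val : Int) 0 1 = pvPairB (n.val : Int) := by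
  decide

theorem loop_eq (r : Int) (h0 : 0 ≤ r) (h1 : r < 365) :
    tempsEnDateLoop 365 r 0 1 = pvPairB r := by
  have hr : r = ((⟨r.toNat, by omega⟩ : Fin 365).val : Int) := by simp; omega
  rw [hr]
  exact loop_key _

-- ===== VERDICT (by name: the statement is the Claim_ definition above) =====
theorem tempsEnDate_spec : Claim_equal_tempsEnDate := by
  intro temps _ _
  show tempsEnDate temps = tempsEnDate_alt temps
  simp only [tempsEnDate, tempsEnDate_alt]
  rw [loop_eq (PySem.Int.mod ((PySem.List.pyGet? temps 0).getD 0) 365)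
      (PySem.Int.mod_nonneg _ (by norm_num))
      (PySem.Int.mod_lt _ (by norm_num))]
  simp [pvPairB]
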